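/-
  The simp attribute of the FIELD VOCABULARY (Gif/Spec/Off.lean, generated; Gif/Spec/Mem.lean): `simp only [gfield]` unfolds every
  offset, accessor and address function to `rd mem (p + k) n` / `p + k + e * i` with numerals.
  (An attribute must be declared in a module of its own before it is used.)
-/
import Lean
/-- The field vocabulary of the giflib proof: offsets, typed reads, element addresses. -/
register_simp_attr gfield
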